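-- pv_equiv track=rewrite | github.com/fefi95/InteligenciaArtificial | IA_II/proyectoFinal/heuristic.py | aggregateHeight
-- ===== SOURCE A (Python) =====
-- def isEmpty(cell):
--     # print cell
--     # print cell == 0
--     return cell == 0
--
-- def aggregateHeight(board):
--     totalHeight = 0
--     for y in range(len(board[0])):
--         for x in range(len(board)):
--             if not isEmpty(board[x][y]):
--                 totalHeight += (len(board) - x)
--                 # print len(board) - x
--                 break
--
--     return totalHeight
-- ===== SOURCE B (Python) =====
-- def isEmpty(cell):
--     return cell == 0
--
-- def aggregateHeight(board):
--     n = len(board)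
--     heights = [0] * len(board[0])
--     for x, row in enumerate(board):
--         for y in range(len(heights)):
--             if not isEmpty(row[y]):
--                 heights[y] = max(heights[y], n - x)
--     return sum(heights)
-- ===== Notes on version B (the rewrite author's own statement) =====
-- stated objective: alternative
-- what changed: Replaces the column-major scan that walks each column top-down until the first filled cell (early break) with a single row-major pass that maintains a per-column running maximum of len(board)-x in a heights array and sums it.
-- outside the precondition, e.g. on aggregateHeight([[1, 1], [5]]): A returns 4, B raises IndexError
import Mathlib
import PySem

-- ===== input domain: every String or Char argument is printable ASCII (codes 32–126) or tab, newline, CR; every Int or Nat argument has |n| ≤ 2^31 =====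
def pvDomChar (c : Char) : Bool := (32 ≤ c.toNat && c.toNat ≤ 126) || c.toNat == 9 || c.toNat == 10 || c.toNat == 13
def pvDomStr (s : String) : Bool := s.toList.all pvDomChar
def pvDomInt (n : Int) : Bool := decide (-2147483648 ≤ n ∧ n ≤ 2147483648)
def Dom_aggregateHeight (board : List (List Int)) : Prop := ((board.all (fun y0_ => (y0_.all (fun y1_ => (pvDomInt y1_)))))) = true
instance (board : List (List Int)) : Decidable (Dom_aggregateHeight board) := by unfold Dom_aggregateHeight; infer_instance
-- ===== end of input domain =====

-- B replaces A's column-major scan-until-first-filled (early break) by a row-major pass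
-- keeping a per-column running maximum of len(board)-x; alternative decomposition, same cost.

-- ===== PORT A =====
def isEmptyCell (cell : Int) : Bool := cell == 0

-- inner 'for x in range(len(board))' loop with its break
def aggInnerA (board : List (List Int)) (n : Nat) (y : Nat) : List Nat → Int
  | [] => 0
  | x :: xs =>
      if isEmptyCell ((board.getD x []).getD y 0) then aggInnerA board n y xs
      else (n : Int) - (x : Int)

def aggregateHeight (board : List (List Int)) : Int :=
  (List.range (board.headD []).length).foldl
    (fun acc y => acc + aggInnerA board board.length y (List.range board.length)) 0

-- ===== PORT B =====
-- inner 'for y in range(len(heights))' loop of Source B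
def altRowPass (n : Int) (x : Int) (row : List Int) (hs : List Int) : List Int :=
  (List.range hs.length).foldl
    (fun h y => if isEmptyCell (row.getD y 0) then h else h.set y (max (h.getD y 0) (n - x))) hs

def aggregateHeight_alt (board : List (List Int)) : Int :=
  let n : Int := board.length
  let heights0 : List Int := List.replicate (board.headD []).length 0
  ((PySem.List.enumerate board 0).foldl (fun hs p => altRowPass n p.1 p.2 hs) heights0).sum

-- ===== PRECONDITION & SPEC =====
-- Pre_ excludes the empty board (A raises IndexError on board[0]) and ragged boards where some
-- row is shorter than the first row: there A's surviving or raising depends on the accidental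
-- timing of its break, and B, which reads every cell of each tracked column, raises IndexError.
def Pre_aggregateHeight (board : List (List Int)) : Prop :=
  board ≠ [] ∧ ∀ row ∈ board, (board.headD []).length ≤ row.length
instance (board : List (List Int)) : Decidable (Pre_aggregateHeight board) := by
  unfold Pre_aggregateHeight; infer_instance

def pvWitness_aggregateHeight : List (List Int) := [[1, 0], [0, 2]]

def Spec_aggregateHeight (board : List (List Int)) (out : Int) : Prop := out = aggregateHeight_alt board
instance (board : List (List Int)) (out : Int) : Decidable (Spec_aggregateHeight board out) := by unfold Spec_aggregateHeight; infer_instance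

-- ===== CLAIM (what is proved, stated in full; the proofs are below) =====
def Claim_equal_aggregateHeight : Prop := ∀ (board : List (List Int)), Dom_aggregateHeight board → Pre_aggregateHeight board → Spec_aggregateHeight board (aggregateHeight board)

-- ===== LEMMAS AND PROOFS =====

-- the per-cell update of altRowPass
def rpStep (row : List Int) (v : Int) (h : List Int) (y : Nat) : List Int :=
  if isEmptyCell (row.getD y 0) then h else h.set y (max (h.getD y 0) v)

lemma length_rpStep (row : List Int) (v : Int) (h : List Int) (y : Nat) :
    (rpStep row v h y).length = h.length := by
  unfold rpStep; split <;> simp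

lemma length_foldl_rpStep (row : List Int) (v : Int) (ys : List Nat) (h : List Int) :
    (ys.foldl (rpStep row v) h).length = h.length := by
  induction ys generalizing h with
  | nil => rfl
  | cons y ys ih => simp [List.foldl_cons, ih, length_rpStep]

lemma getD_foldl_rpStep (row : List Int) (v : Int) (m : Nat) :
    ∀ (h : List Int) (y : Nat), y < h.length →
      ((List.range m).foldl (rpStep row v) h).getD y 0 =
        if y < m then (if isEmptyCell (row.getD y 0) then h.getD y 0 else max (h.getD y 0) v)
        else h.getD y 0 := by
  induction m with
  | zero => intro h y hy; simp
  | succ m ih =>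
      intro h y hy
      rw [List.range_succ, List.foldl_append]
      set H := (List.range m).foldl (rpStep row v) h with hH
      have hHlen : H.length = h.length := length_foldl_rpStep _ _ _ _
      simp only [List.foldl_cons, List.foldl_nil]
      by_cases hym : y = m
      · subst hym
        have hy' : y < H.length := by omega
        have hold : H.getD y 0 = h.getD y 0 := by
          rw [ih h y hy]; simp
        unfold rpStep
        split
        · rw [hold]; simp [*]
        · have : (H.set y (max (H.getD y 0) v)).getD y 0 = max (H.getD y 0) v := by
            simp [List.getD_eq_getElem?_getD, hy']
          rw [this, hold]
          simp
      · have hstep : (rpStep row v H m).getD y 0 = H.getD y 0 := by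
          unfold rpStep
          split
          · rfl
          · simp [List.getD_eq_getElem?_getD, List.getElem?_set_ne (by omega : m ≠ y)]
        have hiff : (y < m + 1) ↔ (y < m) := by omega
        rw [hstep, ih h y hy]
        simp only [hiff]

lemma length_altRowPass (n x : Int) (row : List Int) (hs : List Int) :
    (altRowPass n x row hs).length = hs.length := by
  unfold altRowPass
  exact length_foldl_rpStep row (n - x) _ hs

lemma getD_altRowPass (n x : Int) (row : List Int) (hs : List Int) (y : Nat) (hy : y < hs.length) :
    (altRowPass n x row hs).getD y 0 =
      if isEmptyCell (row.getD y 0) then hs.getD y 0 else max (hs.getD y 0) (n - x) := by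
  unfold altRowPass
  rw [show ((List.range hs.length).foldl
        (fun h y => if isEmptyCell (row.getD y 0) then h else h.set y (max (h.getD y 0) (n - x))) hs)
      = (List.range hs.length).foldl (rpStep row (n - x)) hs from rfl]
  rw [getD_foldl_rpStep row (n - x) hs.length hs y hy]
  simp [hy]

-- B's per-column accumulator, read off the row stream
def foldMax (n : Int) (y : Nat) : List (Int × List Int) → Int → Int
  | [], a => a
  | p :: ps, a => foldMax n y ps (if isEmptyCell (p.2.getD y 0) then a else max a (n - p.1))

lemma length_foldl_altRowPass (n : Int) (ps : List (Int × List Int)) (hs : List Int) :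
    (ps.foldl (fun hs p => altRowPass n p.1 p.2 hs) hs).length = hs.length := by
  induction ps generalizing hs with
  | nil => rfl
  | cons p ps ih => simp [List.foldl_cons, ih, length_altRowPass]

lemma getD_foldl_altRowPass (n : Int) (ps : List (Int × List Int)) :
    ∀ (hs : List Int) (y : Nat), y < hs.length →
      (ps.foldl (fun hs p => altRowPass n p.1 p.2 hs) hs).getD y 0 =
        foldMax n y ps (hs.getD y 0) := by
  induction ps with
  | nil => intro hs y hy; rfl
  | cons p ps ih =>
      intro hs y hy
      rw [List.foldl_cons]
      have hy' : y < (altRowPass n p.1 p.2 hs).length := by rw [length_altRowPass]; exact hy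
      rw [ih _ y hy', getD_altRowPass n p.1 p.2 hs y hy]
      rfl

-- A's per-column value, read off the row stream
def firstHit (n : Int) (y : Nat) : List (Int × List Int) → Int
  | [] => 0
  | p :: ps => if isEmptyCell (p.2.getD y 0) then firstHit n y ps else n - p.1

lemma foldMax_const (n : Int) (y : Nat) (ps : List (Int × List Int)) :
    ∀ a, (∀ p ∈ ps, n - p.1 ≤ a) → foldMax n y ps a = a := by
  induction ps with
  | nil => intro a _; rfl
  | cons p ps ih =>
      intro a hle
      unfold foldMax
      split
      · exact ih a (fun q hq => hle q (List.mem_cons_of_mem _ hq))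
      · have h1 : n - p.1 ≤ a := hle p (List.mem_cons_self)
        rw [max_eq_left h1]
        exact ih a (fun q hq => hle q (List.mem_cons_of_mem _ hq))

lemma firstHit_eq_foldMax (nN : Nat) (y : Nat) (rows : List (List Int)) :
    ∀ (k : Nat), k + rows.length ≤ nN →
      firstHit (nN : Int) y (PySem.List.enumerate rows (k : Int)) =
        foldMax (nN : Int) y (PySem.List.enumerate rows (k : Int)) 0 := by
  induction rows with
  | nil => intro k _; rfl
  | cons r rs ih =>
      intro k hk
      rw [PySem.List.enumerate_cons]
      unfold firstHit foldMax
      split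
      · have hc : ((k : Int) + 1) = (((k + 1 : Nat)) : Int) := by push_cast; ring
        rw [hc]
        exact ih (k + 1) (by simp only [List.length_cons] at hk; omega)
      · have hkn : (k : Int) < (nN : Int) := by
          have : k < nN := by simp only [List.length_cons] at hk; omega
          exact_mod_cast this
        have h0 : max 0 ((nN : Int) - k) = (nN : Int) - k := by
          apply max_eq_right; omega
        rw [h0]
        have hconst : foldMax (nN : Int) y (PySem.List.enumerate rs ((k : Int) + 1)) ((nN : Int) - k)
            = (nN : Int) - k := by
          apply foldMax_const
          intro p hp
          rcases (PySem.List.mem_enumerate_iff _ _ _).1 hp with ⟨j, hj, hpj⟩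
          subst hpj
          simp only []
          omega
        rw [hconst]

-- sum of a list as the sum over its index range
lemma sum_eq_map_range : ∀ (H : List Int),
    H.sum = ((List.range H.length).map (fun y => H.getD y 0)).sum := by
  intro H
  induction H with
  | nil => simp
  | cons h t ih =>
      rw [List.sum_cons, ih, List.length_cons, List.range_succ_eq_map]
      simp [List.map_map, Function.comp_def]

lemma foldl_add_map (fn : Nat → Int) : ∀ (l : List Nat) (c : Int),
    l.foldl (fun acc y => acc + fn y) c = c + (l.map fn).sum := by
  intro l
  induction l with
  | nil => intro c; simp
  | cons y ys ih => intro c; simp [List.foldl_cons, ih, add_assoc]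

-- bridge: A's index-driven inner loop, read as a recursion on the row stream
lemma aggInnerA_eq_firstHit (board : List (List Int)) (y : Nat) :
    ∀ (rows : List (List Int)) (k : Nat), board.drop k = rows →
      aggInnerA board board.length y (List.range' k rows.length) =
        firstHit (board.length : Int) y (PySem.List.enumerate rows (k : Int)) := by
  intro rows
  induction rows with
  | nil => intro k _; rfl
  | cons r rs ih =>
      intro k hdrop
      have hget : board.getD k [] = r := by
        have : board[k]? = some r := by
          have h0 : (board.drop k)[0]? = some r := by rw [hdrop]; rfl
          rw [List.getElem?_drop] at h0
          simpa using h0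
        simp [List.getD_eq_getElem?_getD, this]
      have hdrop' : board.drop (k + 1) = rs := by
        have : board.drop (k + 1) = (board.drop k).drop 1 := by
          rw [List.drop_drop]
        rw [this, hdrop]; rfl
      rw [List.length_cons, List.range'_succ, PySem.List.enumerate_cons]
      unfold aggInnerA firstHit
      rw [hget]
      split
      · rw [ih (k + 1) hdrop']
        norm_num
      · norm_num

-- ===== VERDICT (by name: the statement is the Claim_ definition above) =====
theorem aggregateHeight_spec : Claim_equal_aggregateHeight := by
  intro board _ _
  unfold Spec_aggregateHeight aggregateHeight aggregateHeight_alt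
  set w := (board.headD []).length with hw
  set nN := board.length with hn
  -- A side
  rw [foldl_add_map, zero_add]
  -- B side
  set H := ((PySem.List.enumerate board 0).foldl
      (fun hs p => altRowPass (nN : Int) p.1 p.2 hs) (List.replicate w 0)) with hH
  have hHlen : H.length = w := by
    rw [hH, length_foldl_altRowPass]; simp
  rw [sum_eq_map_range H, hHlen]
  apply congrArg
  apply List.map_congr_left
  intro y hy
  have hyw : y < w := List.mem_range.1 hy
  -- B column value
  have hB : H.getD y 0 = foldMax (nN : Int) y (PySem.List.enumerate board 0) 0 := by
    rw [hH, getD_foldl_altRowPass _ _ _ y (by simp [hyw])]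
    simp
  -- A column value
  have hA : aggInnerA board nN y (List.range nN) =
      firstHit (nN : Int) y (PySem.List.enumerate board 0) := by
    have := aggInnerA_eq_firstHit board y board 0 (by simp)
    simpa [List.range_eq_range', hn] using this
  rw [hA, hB, show (0 : Int) = ((0 : Nat) : Int) from rfl]
  exact firstHit_eq_foldMax nN y board 0 (by omega)
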